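-- pv_equiv track=rewrite | github.com/loickengit/O_NJU_JK | 路上的球/路上的球.py | solve
-- ===== SOURCE A (Python) =====
-- def solve(balls1, balls2):
--     common = set(balls1) & set(balls2)
--     arr1, arr2 = [], []
--     for num in sorted(common):
--         idx1 = balls1.index(num)
--         idx2 = balls2.index(num)
--         arr1.append(sum(balls1[:idx1+1]))
--         arr2.append(sum(balls2[:idx2+1]))
--         balls1 = balls1[idx1+1:]
--         balls2 = balls2[idx2+1:]
--     ans = max(sum(balls1), sum(balls2))
--     for val1, val2 in zip(arr1, arr2):
--         ans += max(val1, val2)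
--     return ans
-- ===== SOURCE B (Python) =====
-- def solve(balls1, balls2):
--     targets = sorted(set(balls1) & set(balls2))
--
--     def segments(balls):
--         segs, acc, rem = [], 0, targets
--         for x in balls:
--             acc += x
--             if rem and x == rem[0]:
--                 segs.append(acc)
--                 acc = 0
--                 rem = rem[1:]
--         return segs, acc
--
--     segs1, rest1 = segments(balls1)
--     segs2, rest2 = segments(balls2)
--     ans = max(rest1, rest2)
--     for v1, v2 in zip(segs1, segs2):
--         ans += max(v1, v2)
--     return ans
-- ===== Notes on version B (the rewrite author's own statement) =====
-- stated objective: faster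
-- what changed: Replaced the per-common-value rescan (list.index + slice + sum of the shrinking remainder) by a single left-to-right pass per list that accumulates a running segment sum and cuts whenever the current element equals the next pending sorted common value.
import Mathlib
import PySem

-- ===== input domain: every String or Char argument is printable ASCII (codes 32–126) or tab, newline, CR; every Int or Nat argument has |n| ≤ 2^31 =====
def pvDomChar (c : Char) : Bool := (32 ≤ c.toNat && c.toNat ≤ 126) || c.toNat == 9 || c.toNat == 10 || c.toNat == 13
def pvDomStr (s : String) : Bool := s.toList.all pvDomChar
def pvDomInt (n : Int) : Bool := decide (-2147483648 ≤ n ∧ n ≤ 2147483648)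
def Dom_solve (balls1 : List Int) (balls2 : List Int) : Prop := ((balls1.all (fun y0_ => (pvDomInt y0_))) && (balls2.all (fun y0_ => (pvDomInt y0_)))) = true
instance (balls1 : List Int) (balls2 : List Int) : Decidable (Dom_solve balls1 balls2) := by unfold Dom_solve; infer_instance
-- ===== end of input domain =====

-- B replaces A's per-common-value rescan (index/slice/sum of the shrinking remainder) by one
-- running-sum pass per list that cuts at the next pending sorted common value (objective: faster).


-- ===== PORT A =====
-- one loop step of A: idx = balls.index(num) (none = ValueError, excluded by Pre_, getD 0 is junk there),
-- append sum(balls[:idx+1]) to arr, continue with balls[idx+1:]; both lists share the loop.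
def solveStep (st : List Int × List Int × List Int × List Int) (num : Int) :
    List Int × List Int × List Int × List Int :=
  let idx1 : Nat := (PySem.List.index? st.1 num).getD 0
  let idx2 : Nat := (PySem.List.index? st.2.1 num).getD 0
  (PySem.List.slice st.1 (some ((idx1 : Int) + 1)) none,
   PySem.List.slice st.2.1 (some ((idx2 : Int) + 1)) none,
   st.2.2.1 ++ [(PySem.List.slice st.1 none (some ((idx1 : Int) + 1))).sum],
   st.2.2.2 ++ [(PySem.List.slice st.2.1 none (some ((idx2 : Int) + 1))).sum])

def solve (balls1 : List Int) (balls2 : List Int) : Int :=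
  let common := PySem.Set.inter (PySem.Set.ofList balls1) (PySem.Set.ofList balls2)
  let st := (PySem.List.sorted common (fun x => x) false).foldl solveStep (balls1, balls2, [], [])
  let ans := max st.1.sum st.2.1.sum
  (st.2.2.1.zip st.2.2.2).foldl (fun ans p => ans + max p.1 p.2) ans

-- ===== PORT B =====
-- Source B's inner `segments`: one pass, running sum acc, cut when x equals the next pending target.
def altStep (st : List Int × Int × List Int) (x : Int) : List Int × Int × List Int :=
  let acc := st.2.1 + x
  match st.2.2 with
  | r0 :: rtl => if x = r0 then (st.1 ++ [acc], 0, rtl) else (st.1, acc, st.2.2)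
  | [] => (st.1, acc, [])

def altSegments (targets : List Int) (balls : List Int) : List Int × Int × List Int :=
  balls.foldl altStep ([], 0, targets)

def solve_alt (balls1 : List Int) (balls2 : List Int) : Int :=
  let targets := PySem.List.sorted (PySem.Set.inter (PySem.Set.ofList balls1) (PySem.Set.ofList balls2)) (fun x => x) false
  let s1 := altSegments targets balls1
  let s2 := altSegments targets balls2
  let ans := max s1.2.1 s2.2.1
  (s1.1.zip s2.1).foldl (fun ans p => ans + max p.1 p.2) ans

-- ===== PRECONDITION & SPEC =====
-- Pre_ excludes exactly the inputs on which A raises ValueError: those where the sorted common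
-- values cannot be matched left to right (as a subsequence) in both lists.
def Pre_solve (balls1 : List Int) (balls2 : List Int) : Prop :=
  (PySem.List.sorted (PySem.Set.inter (PySem.Set.ofList balls1) (PySem.Set.ofList balls2)) (fun x => x) false).Sublist balls1 ∧
  (PySem.List.sorted (PySem.Set.inter (PySem.Set.ofList balls1) (PySem.Set.ofList balls2)) (fun x => x) false).Sublist balls2
instance (balls1 : List Int) (balls2 : List Int) : Decidable (Pre_solve balls1 balls2) := by unfold Pre_solve; infer_instance
def pvWitness_solve : List Int × List Int := ([1, 2], [1, 2])

def Spec_solve (balls1 : List Int) (balls2 : List Int) (out : Int) : Prop := out = solve_alt balls1 balls2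
instance (balls1 : List Int) (balls2 : List Int) (out : Int) : Decidable (Spec_solve balls1 balls2 out) := by unfold Spec_solve; infer_instance

-- ===== CLAIM (what is proved, stated in full; the proofs are below) =====
def Claim_equal_solve : Prop := ∀ (balls1 : List Int) (balls2 : List Int), Dom_solve balls1 balls2 → Pre_solve balls1 balls2 → Spec_solve balls1 balls2 (solve balls1 balls2)

-- ===== LEMMAS AND PROOFS =====

-- A's loop, per list: (segment sums, remaining balls) after consuming the targets greedily.
def aRun : List Int → List Int → List Int × List Int
  | [], b => ([], b)
  | v :: vs, b =>
    let i : Nat := (PySem.List.index? b v).getD 0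
    let r := aRun vs (PySem.List.slice b (some ((i : Int) + 1)) none)
    ((PySem.List.slice b none (some ((i : Int) + 1))).sum :: r.1, r.2)

-- A's combined fold = the two independent per-list runs, arrays accumulated on the right.
theorem foldl_solveStep (nums : List Int) (b1 b2 a1 a2 : List Int) :
    nums.foldl solveStep (b1, b2, a1, a2) =
      ((aRun nums b1).2, (aRun nums b2).2, a1 ++ (aRun nums b1).1, a2 ++ (aRun nums b2).1) := by
  induction nums generalizing b1 b2 a1 a2 with
  | nil => simp [aRun]
  | cons v vs ih => simp [aRun, solveStep, List.foldl_cons, ih]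

-- B's pass ignores elements not equal to the pending target.
theorem foldl_altStep_skip (v : Int) (vs segs : List Int) :
    ∀ (p : List Int) (acc : Int), v ∉ p →
      p.foldl altStep (segs, acc, v :: vs) = (segs, acc + p.sum, v :: vs) := by
  intro p
  induction p with
  | nil => intro acc _; simp
  | cons x xs ih =>
    intro acc hv
    have hxv : x ≠ v := fun h => hv (h ▸ List.mem_cons_self)
    have hv' : v ∉ xs := fun h => hv (List.mem_cons_of_mem _ h)
    simp only [List.foldl_cons, altStep, if_neg hxv]
    rw [ih _ hv']
    simp [List.sum_cons]
    ring

-- B's pass with no pending targets just sums the rest.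
theorem foldl_altStep_nil (b segs : List Int) (acc : Int) :
    b.foldl altStep (segs, acc, []) = (segs, acc + b.sum, []) := by
  induction b generalizing acc with
  | nil => simp
  | cons x xs ih => simp [List.foldl_cons, altStep, ih]; ring

-- greedy step: a sublist starting with v survives dropping everything up to the first v.
theorem sublist_tail_of_cons_sublist (v : Int) (vs p suf : List Int)
    (h : (v :: vs).Sublist (p ++ v :: suf)) (hv : v ∉ p) : vs.Sublist suf := by
  induction p with
  | nil =>
    simp only [List.nil_append] at h
    cases h with
    | cons _ h' => exact ((List.sublist_cons_self v vs).trans h')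
    | cons₂ _ h' => exact h'
  | cons q qs ih =>
    have hvq : v ≠ q := fun hh => hv (hh ▸ List.mem_cons_self)
    have hv' : v ∉ qs := fun hh => hv (List.mem_cons_of_mem _ hh)
    cases h with
    | cons _ h' => exact ih h' hv'
    | cons₂ _ h' => exact absurd rfl hvq

-- Main per-list lemma: under the sublist precondition, B's pass computes exactly A's run.
theorem altSegments_eq_aRun (ts b : List Int) (h : ts.Sublist b) :
    ∀ segs : List Int, b.foldl altStep (segs, 0, ts) =
      (segs ++ (aRun ts b).1, (aRun ts b).2.sum, []) := by
  induction ts generalizing b with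
  | nil => intro segs; simpa [aRun] using foldl_altStep_nil b segs 0
  | cons v vs ih =>
    intro segs
    have hvb : v ∈ b := h.subset List.mem_cons_self
    obtain ⟨i, hi⟩ := (PySem.List.index?_isSome_iff (xs := b) (v := v)).2 hvb |> Option.isSome_iff_exists.1
    obtain ⟨p, suf, hb, hlen, hvp⟩ := (PySem.List.index?_eq_some_iff b v i).1 hi
    have hgd : (PySem.List.index? b v).getD 0 = i := by rw [hi]; rfl
    have hvs : vs.Sublist suf := sublist_tail_of_cons_sublist v vs p suf (hb ▸ h) hvp
    have htake : PySem.List.slice b none (some ((i : Int) + 1)) = p ++ [v] := by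
      have : ((i : Int) + 1) = ((i + 1 : Nat) : Int) := by push_cast; ring
      rw [this, PySem.List.slice_to_natCast, hb, ← hlen]
      rw [show p ++ v :: suf = (p ++ [v]) ++ suf by simp]
      rw [show p.length + 1 = (p ++ [v]).length by simp]
      exact List.take_left
    have hdrop : PySem.List.slice b (some ((i : Int) + 1)) none = suf := by
      have : ((i : Int) + 1) = ((i + 1 : Nat) : Int) := by push_cast; ring
      rw [this, PySem.List.slice_from_natCast, hb, ← hlen]
      rw [show p ++ v :: suf = (p ++ [v]) ++ suf by simp]
      rw [show p.length + 1 = (p ++ [v]).length by simp]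
      exact List.drop_left
    have hsplit : b.foldl altStep (segs, 0, v :: vs)
        = suf.foldl altStep (segs ++ [p.sum + v], 0, vs) := by
      rw [hb, show p ++ v :: suf = (p ++ [v]) ++ suf by simp, List.foldl_append,
        List.foldl_append, foldl_altStep_skip v vs segs p 0 hvp]
      simp [altStep]
    rw [hsplit, ih suf hvs (segs ++ [p.sum + v])]
    simp only [aRun, hgd, hdrop, htake]
    simp [List.sum_append]

-- ===== VERDICT (by name: the statement is the Claim_ definition above) =====
theorem solve_spec : Claim_equal_solve := by
  intro balls1 balls2 _ hpre
  obtain ⟨h1, h2⟩ := hpre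
  unfold Spec_solve solve solve_alt altSegments
  simp only [foldl_solveStep, altSegments_eq_aRun _ _ h1, altSegments_eq_aRun _ _ h2]
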